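-- pv_equiv track=rewrite | github.com/fletchc/rookount | rookount.py | build
-- ===== SOURCE A (Python) =====
-- def createBoard(n):
--     return [[[0 for x in range(n)] for y in range(n)] for z in range(n)]
--
-- def build(old):
--     n = len(old)
--     new = createBoard(n + 1)
--     for x in range(n):
--         for y in range(n):
--             for z in range(n):
--                 new[x][y][z] = old[x][y][z]
--     return new
-- ===== SOURCE B (Python) =====
-- def build(old):
--     n = len(old)
--     def pad_row(r):
--         return [r[z] for z in range(n)] + [0]
--     def pad_plane(p):
--         return [pad_row(p[y]) for y in range(n)] + [[0] * (n + 1)]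
--     return [pad_plane(old[x]) for x in range(n)] + [[[0] * (n + 1) for _ in range(n + 1)]]
-- ===== Notes on version B (the rewrite author's own statement) =====
-- stated objective: alternative
-- what changed: B never allocates a zero board and never mutates: it builds the result bottom-up by composition - pad each row with a trailing 0, pad each plane with its padded rows plus one appended zero row, then append one whole zero plane - whereas A zero-fills an (n+1)^3 board and then overwrites cells with a triple index copy loop.
import Mathlib
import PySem

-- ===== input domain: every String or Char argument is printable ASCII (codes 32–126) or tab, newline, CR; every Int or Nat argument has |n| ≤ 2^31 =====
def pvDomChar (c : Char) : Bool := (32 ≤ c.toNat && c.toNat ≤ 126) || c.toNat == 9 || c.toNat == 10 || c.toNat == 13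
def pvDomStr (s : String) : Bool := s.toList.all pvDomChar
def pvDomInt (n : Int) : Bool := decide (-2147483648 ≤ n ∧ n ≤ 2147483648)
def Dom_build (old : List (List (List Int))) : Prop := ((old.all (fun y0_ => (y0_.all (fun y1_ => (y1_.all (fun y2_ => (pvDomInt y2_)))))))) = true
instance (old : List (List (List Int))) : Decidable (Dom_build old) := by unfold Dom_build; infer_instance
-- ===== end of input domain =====

-- B builds the padded board bottom-up by composition (pad each row, pad each plane, append
-- the zero borders) instead of A's zero-board allocation followed by a triple mutation copy
-- loop (objective: alternative decomposition; same asymptotic cost).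

-- ===== PORT A =====
-- old[x][y][z] read; pyGetD with defaults — exact on Pre_build, where every access is in range
-- (outside Pre_build Python raises IndexError).
def pvGet3 (old : List (List (List Int))) (x y z : Int) : Int :=
  PySem.List.pyGetD (PySem.List.pyGetD (PySem.List.pyGetD old x []) y []) z 0

def createBoard (n : Int) : List (List (List Int)) :=
  (PySem.List.pyRange 0 n 1).map (fun _z =>
    (PySem.List.pyRange 0 n 1).map (fun _y =>
      (PySem.List.pyRange 0 n 1).map (fun _x => (0 : Int))))

-- new[x][y][z] = v : read new[x], new[x][y], set index z; indices here are range values,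
-- nonnegative and in range, so List.set on .toNat is exact.
def pvSet3 (b : List (List (List Int))) (x y z : Int) (v : Int) : List (List (List Int)) :=
  b.set x.toNat ((PySem.List.pyGetD b x []).set y.toNat
    (((PySem.List.pyGetD b x []).getD y.toNat []).set z.toNat v))

def build (old : List (List (List Int))) : List (List (List Int)) :=
  let n : Int := old.length
  let new := createBoard (n + 1)
  (PySem.List.pyRange 0 n 1).foldl (fun acc x =>
    (PySem.List.pyRange 0 n 1).foldl (fun acc y =>
      (PySem.List.pyRange 0 n 1).foldl (fun acc z =>
        pvSet3 acc x y z (pvGet3 old x y z)) acc) acc) new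

-- ===== PORT B =====
-- range(n) over a Nat length is List.range n; the reads r[z] / p[y] / old[x] take
-- nonnegative in-range indices inside Pre_build, so List.getD with a default is exact there
-- (outside Pre_build Python raises IndexError, like A); [0]*(n+1) is List.replicate.
def build_alt (old : List (List (List Int))) : List (List (List Int)) :=
  let n := old.length
  let padRow : List Int → List Int := fun r => (List.range n).map (fun z => r.getD z 0) ++ [0]
  let padPlane : List (List Int) → List (List Int) :=
    fun p => (List.range n).map (fun y => padRow (p.getD y [])) ++ [List.replicate (n + 1) (0 : Int)]
  (List.range n).map (fun x => padPlane (old.getD x [])) ++ [List.replicate (n + 1) (List.replicate (n + 1) (0 : Int))]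

-- ===== PRECONDITION & SPEC =====
-- Pre_build excludes exactly the ragged inputs (some plane with fewer than len(old) rows, or
-- some accessed row shorter than len(old)), on which Python A raises IndexError at old[x][y] / old[x][y][z].
def Pre_build (old : List (List (List Int))) : Prop :=
  ∀ r ∈ old, old.length ≤ r.length ∧ ∀ s ∈ r.take old.length, old.length ≤ s.length
instance (old : List (List (List Int))) : Decidable (Pre_build old) := by unfold Pre_build; infer_instance

def pvWitness_build : List (List (List Int)) := [[[1, 2], [3, 4]], [[5, 6], [7, 8]]]

def Spec_build (old : List (List (List Int))) (out : List (List (List Int))) : Prop := out = build_alt old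
instance (old : List (List (List Int))) (out : List (List (List Int))) : Decidable (Spec_build old out) := by unfold Spec_build; infer_instance

-- ===== CLAIM (what is proved, stated in full; the proofs are below) =====
def Claim_equal_build : Prop := ∀ (old : List (List (List Int))), Dom_build old → Pre_build old → Spec_build old (build old)

-- ===== LEMMAS AND PROOFS =====

-- proof-only intermediate: A's result described cell-by-cell over nat ranges
def pvIdxForm (old : List (List (List Int))) : List (List (List Int)) :=
  let n := old.length
  (List.range (n + 1)).map (fun x =>
    (List.range (n + 1)).map (fun y =>
      (List.range (n + 1)).map (fun z =>
        if x < n ∧ y < n ∧ z < n then pvGet3 old ↑x ↑y ↑z else 0)))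

-- setting an index to its current value is the identity (out of range: both are no-ops)
theorem pv_set_getD_self {α : Type} (l : List α) (i : Nat) (d : α) :
    l.set i (l.getD i d) = l := by
  by_cases h : i < l.length
  · rw [List.getD_eq_getElem l d h]; exact List.set_getElem_self h
  · exact List.set_eq_of_length_le (by omega)

theorem pv_getD_set_self {α : Type} (l : List α) (i : Nat) (a d : α) (h : i < l.length) :
    (l.set i a).getD i d = a := by
  rw [List.getD_eq_getElem _ d (by simpa using h)]
  simp

-- a fold that only ever rewrites slot x collapses to one set of slot x
theorem pv_foldl_upd {β : Type} (x : Nat) (dβ : β) (T : Nat → β → β) :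
    ∀ (m : Nat) (acc : List β),
      (List.range m).foldl (fun a z => a.set x (T z (a.getD x dβ))) acc
        = acc.set x ((List.range m).foldl (fun v z => T z v) (acc.getD x dβ)) := by
  intro m
  induction m with
  | zero => intro acc; exact (pv_set_getD_self acc x dβ).symm
  | succ m ih =>
    intro acc
    rw [List.range_succ, List.foldl_append, List.foldl_append, ih]
    simp only [List.foldl_cons, List.foldl_nil]
    by_cases hx : x < acc.length
    · rw [pv_getD_set_self _ _ _ _ hx, List.set_set]
    · have h' : acc.length ≤ x := by omega
      rw [List.set_eq_of_length_le (by simpa using h'), List.set_eq_of_length_le h',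
        List.set_eq_of_length_le h']

-- folding "set slot j to F j (current slot j)" over range m, in order, is a mapIdx
theorem pv_foldl_set_range {α : Type} (d : α) (F : Nat → α → α) :
    ∀ (m : Nat) (s : List α), m ≤ s.length →
      (List.range m).foldl (fun a j => a.set j (F j (a.getD j d))) s
        = s.mapIdx (fun j v => if j < m then F j v else v) := by
  intro m
  induction m with
  | zero =>
    intro s _
    simp only [List.range_zero, List.foldl_nil, Nat.not_lt_zero, if_false]
    exact (List.ext_getElem (by simp) (by simp)).symm
  | succ m ih =>
    intro s hm
    rw [List.range_succ, List.foldl_append, ih s (by omega)]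
    simp only [List.foldl_cons, List.foldl_nil]
    have hlen : (s.mapIdx fun j v => if j < m then F j v else v).length = s.length := by simp
    have hm' : m < s.length := by omega
    have hget : (s.mapIdx fun j v => if j < m then F j v else v).getD m d = s[m] := by
      rw [List.getD_eq_getElem _ d (by omega)]
      simp [List.getElem_mapIdx]
    rw [hget]
    apply List.ext_getElem (by simp)
    intro i hi1 hi2
    rw [List.getElem_set]
    by_cases him : i = m
    · subst him; simp [List.getElem_mapIdx]
    · have hi : i < s.length := by simpa using hi2
      simp only [List.getElem_mapIdx]
      split_ifs with h1 h2 h2 <;> first | rfl | omega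

theorem build_eq_idx (old : List (List (List Int))) : build old = pvIdxForm old := by
  have hc : ((old.length : Int) + 1) = ((old.length + 1 : Nat) : Int) := by push_cast; ring
  simp only [build, pvIdxForm, createBoard, pvSet3, hc, PySem.List.pyRange_zero_nat,
    List.foldl_map, List.map_map, Function.comp_def, PySem.List.pyGetD_natCast,
    Int.toNat_natCast]
  set n := old.length with hn
  set Z1 : List Int := (List.range (n + 1)).map (fun _ => (0 : Int)) with hZ1
  set Z2 : List (List Int) := (List.range (n + 1)).map (fun _ => Z1) with hZ2
  set Z3 : List (List (List Int)) := (List.range (n + 1)).map (fun _ => Z2) with hZ3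
  -- collapse the z-loop: it only rewrites slot x (and inside it slot y)
  have e1 : ∀ (x y : ℕ) (acc : List (List (List Int))),
      (List.range n).foldl (fun acc z =>
          acc.set x ((acc.getD x []).set y (((acc.getD x []).getD y []).set z (pvGet3 old ↑x ↑y ↑z)))) acc
        = acc.set x ((acc.getD x []).set y
            ((List.range n).foldl (fun c z => c.set z (pvGet3 old ↑x ↑y ↑z)) ((acc.getD x []).getD y []))) := by
    intro x y acc
    rw [pv_foldl_upd x [] (fun z row => row.set y ((row.getD y []).set z (pvGet3 old ↑x ↑y ↑z))) n acc,
      pv_foldl_upd y [] (fun z c => c.set z (pvGet3 old ↑x ↑y ↑z)) n ((acc.getD x []))]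
  -- collapse the y-loop: it only rewrites slot x
  have e2 : ∀ (x : ℕ) (acc : List (List (List Int))),
      (List.range n).foldl (fun acc y =>
          acc.set x ((acc.getD x []).set y
            ((List.range n).foldl (fun c z => c.set z (pvGet3 old ↑x ↑y ↑z)) ((acc.getD x []).getD y []))) ) acc
        = acc.set x ((List.range n).foldl (fun r y =>
            r.set y ((List.range n).foldl (fun c z => c.set z (pvGet3 old ↑x ↑y ↑z)) (r.getD y []))) (acc.getD x [])) := by
    intro x acc
    exact pv_foldl_upd x []
      (fun y row => row.set y ((List.range n).foldl (fun c z => c.set z (pvGet3 old ↑x ↑y ↑z)) (row.getD y []))) n acc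
  simp only [e1, e2]
  -- the x-loop is now a set-per-slot fold over the zero board
  rw [pv_foldl_set_range []
    (fun x row => (List.range n).foldl (fun r y =>
      r.set y ((List.range n).foldl (fun c z => c.set z (pvGet3 old ↑x ↑y ↑z)) (r.getD y []))) row) n Z3
    (by simp [hZ3])]
  have eR : ∀ (x : ℕ),
      (List.range n).foldl (fun r y =>
          r.set y ((List.range n).foldl (fun c z => c.set z (pvGet3 old ↑x ↑y ↑z)) (r.getD y []))) Z2
        = Z2.mapIdx (fun y c =>
            if y < n then (List.range n).foldl (fun c' z => c'.set z (pvGet3 old ↑x ↑y ↑z)) c else c) := by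
    intro x
    exact pv_foldl_set_range ([] : List Int)
      (fun y c => (List.range n).foldl (fun c' z => c'.set z (pvGet3 old ↑x ↑y ↑z)) c) n Z2 (by simp [hZ2])
  have eC : ∀ (x y : ℕ),
      (List.range n).foldl (fun c z => c.set z (pvGet3 old ↑x ↑y ↑z)) Z1
        = Z1.mapIdx (fun z v => if z < n then pvGet3 old ↑x ↑y ↑z else v) := by
    intro x y
    have := pv_foldl_set_range (0 : Int) (fun z _ => pvGet3 old ↑x ↑y ↑z) n Z1 (by simp [hZ1])
    simpa [pv_set_getD_self] using this
  apply List.ext_getElem (by simp [hZ3])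
  intro x hx1 hx2
  have hxn : x < n + 1 := by simpa [hZ3] using hx1
  simp only [List.getElem_mapIdx, hZ3, List.getElem_map, List.getElem_range]
  by_cases hxlt : x < n
  · rw [if_pos hxlt, eR x]
    apply List.ext_getElem (by simp [hZ2])
    intro y hy1 hy2
    have hyn : y < n + 1 := by simpa [hZ2] using hy1
    simp only [List.getElem_mapIdx, hZ2, List.getElem_map, List.getElem_range]
    by_cases hylt : y < n
    · rw [if_pos hylt, eC x y]
      apply List.ext_getElem (by simp [hZ1])
      intro z hz1 hz2
      have hzn : z < n + 1 := by simpa [hZ1] using hz1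
      simp only [List.getElem_mapIdx, hZ1, List.getElem_map, List.getElem_range]
      by_cases hzlt : z < n
      · rw [if_pos hzlt, if_pos ⟨hxlt, hylt, hzlt⟩]
      · rw [if_neg hzlt, if_neg (fun h => hzlt h.2.2)]
    · rw [if_neg hylt]
      apply List.ext_getElem (by simp [hZ1])
      intro z hz1 hz2
      simp only [hZ1, List.getElem_map, List.getElem_range]
      rw [if_neg (fun h => hylt h.2.1)]
  · rw [if_neg hxlt]
    apply List.ext_getElem (by simp [hZ2, hZ1])
    intro y hy1 hy2
    simp only [hZ2, List.getElem_map, List.getElem_range]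
    apply List.ext_getElem (by simp [hZ1])
    intro z hz1 hz2
    simp only [hZ1, List.getElem_map, List.getElem_range]
    rw [if_neg (fun h => hxlt h.1)]

theorem idx_eq_alt (old : List (List (List Int))) :
    pvIdxForm old = build_alt old := by
  simp only [pvIdxForm, build_alt]
  set n := old.length with hn
  apply List.ext_getElem (by simp [hn])
  intro x hx1 hx2
  have hxn : x < n + 1 := by simpa using hx1
  simp only [List.getElem_map, List.getElem_range]
  by_cases hxlt : x < n
  · have hxa : x < ((List.range n).map fun x => (List.range n).map (fun y => (List.range n).map (fun z => ((old.getD x []).getD y []).getD z 0) ++ [(0:Int)]) ++ [List.replicate (n+1) (0:Int)]).length := by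
      simpa using hxlt
    rw [List.getElem_append_left hxa, List.getElem_map, List.getElem_range]
    apply List.ext_getElem (by simp)
    intro y hy1 hy2
    have hyn : y < n + 1 := by simpa using hy1
    simp only [List.getElem_map, List.getElem_range]
    by_cases hylt : y < n
    · have hya : y < ((List.range n).map fun y => (List.range n).map (fun z => ((old.getD x []).getD y []).getD z 0) ++ [(0:Int)]).length := by
        simpa using hylt
      rw [List.getElem_append_left hya, List.getElem_map, List.getElem_range]
      apply List.ext_getElem (by simp)
      intro z hz1 hz2
      have hzn : z < n + 1 := by simpa using hz1
      simp only [List.getElem_map, List.getElem_range]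
      by_cases hzlt : z < n
      · have hza : z < ((List.range n).map fun z => ((old.getD x []).getD y []).getD z 0).length := by
          simpa using hzlt
        rw [List.getElem_append_left hza, List.getElem_map, List.getElem_range,
          if_pos ⟨hxlt, hylt, hzlt⟩]
        simp [pvGet3, PySem.List.pyGetD_natCast]
      · have hza : ((List.range n).map fun z => ((old.getD x []).getD y []).getD z 0).length ≤ z := by
          simp; omega
        rw [if_neg (fun h => hzlt h.2.2), List.getElem_append_right hza]
        simp
    · have hya : ((List.range n).map fun y => (List.range n).map (fun z => ((old.getD x []).getD y []).getD z 0) ++ [(0:Int)]).length ≤ y := by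
        simp; omega
      rw [List.getElem_append_right hya]
      apply List.ext_getElem (by simp)
      intro z hz1 hz2
      simp only [List.getElem_map, List.getElem_range]
      rw [if_neg (fun h => hylt h.2.1)]
      simp
  · have hxa : ((List.range n).map fun x => (List.range n).map (fun y => (List.range n).map (fun z => ((old.getD x []).getD y []).getD z 0) ++ [(0:Int)]) ++ [List.replicate (n+1) (0:Int)]).length ≤ x := by
      simp; omega
    rw [List.getElem_append_right hxa]
    apply List.ext_getElem (by simp)
    intro y hy1 hy2
    simp only [List.getElem_map, List.getElem_range]
    apply List.ext_getElem (by simp)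
    intro z hz1 hz2
    simp only [List.getElem_map, List.getElem_range]
    rw [if_neg (fun h => hxlt h.1)]
    simp

-- ===== VERDICT (by name: the statement is the Claim_ definition above) =====
theorem build_spec : Claim_equal_build := by
  intro old _ _
  unfold Spec_build
  rw [build_eq_idx, idx_eq_alt old]
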